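-- pv_equiv track=rewrite | github.com/drifter909/MITx_6.00.1x | PythonEatsFruit.py | nfruits
-- ===== SOURCE A (Python) =====
-- def nfruits(fruit, fruits_eaten):
--     """
--     fruit is a dictionary with the type of fruit as a key, and the amount as the value.
--     fruits_eaten is a string
--     returns the highest value after the fruit has been eaten and/or bought
--     """
--
--     count = 0
--     for char in fruits_eaten:
--         count += 1                               #keeps track of how many fruits eaten
--         for key in fruit:
--             if key == char:
--                 fruit[key] -= 1                  # eats fruit
--             elif count != len(fruits_eaten):    # only buy fruit if it isn't the last fruit eaten
--                 fruit[key] += 1                  # buys fruit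
--     return max(fruit.values())
-- ===== SOURCE B (Python) =====
-- def nfruits(fruit, fruits_eaten):
--     # Closed-form rewrite: A mutates the fruit dict in place; B leaves it untouched
--     # (return-value equivalence only).
--     counts = {}
--     for ch in fruits_eaten:
--         counts[ch] = counts.get(ch, 0) + 1
--     L = len(fruits_eaten)
--     last = fruits_eaten[-1] if L else None
--     return max(v + L - 2 * counts.get(k, 0) - (1 if L and last != k else 0)
--                for k, v in fruit.items())
-- ===== Notes on version B (the rewrite author's own statement) =====
-- stated objective: faster
-- what changed: B replaces A's per-character simulation that updates every dict key for each eaten fruit by a single counting pass over the string plus a per-key closed-form net change (length - 2*occurrences - last-character adjustment) added to each initial value; B does not mutate the fruit dict (return value is unchanged).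
import Mathlib
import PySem

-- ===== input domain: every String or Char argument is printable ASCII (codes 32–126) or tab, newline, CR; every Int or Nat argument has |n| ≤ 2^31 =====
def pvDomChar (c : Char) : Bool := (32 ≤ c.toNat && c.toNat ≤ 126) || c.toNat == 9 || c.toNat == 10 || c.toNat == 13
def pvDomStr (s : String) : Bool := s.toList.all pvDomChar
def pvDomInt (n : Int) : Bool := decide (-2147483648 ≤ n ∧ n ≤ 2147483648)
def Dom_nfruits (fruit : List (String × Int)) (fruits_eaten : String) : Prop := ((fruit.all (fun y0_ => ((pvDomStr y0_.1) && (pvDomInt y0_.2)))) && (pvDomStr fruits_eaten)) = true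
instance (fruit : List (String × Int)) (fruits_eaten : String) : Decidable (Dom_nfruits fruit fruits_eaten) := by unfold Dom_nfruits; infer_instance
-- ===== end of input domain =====

-- B replaces A's O(N·K) per-character simulation by an O(N+K) closed form (count characters
-- once, add each key's net change to its initial value); A mutates the fruit dict in place,
-- B does not — the equivalence proved here is about the return value only.

-- ===== PORT A =====
-- Python A receives the dict built from the association list; iterating the dict's keys and
-- updating each key's value in place is transcribed as a map over the entry list (same
-- traversal, same branches, same values).
def nfruits (fruit : List (String × Int)) (fruits_eaten : String) : Int :=
  let d0 := (PySem.Dict.ofList fruit).items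
  let L : Int := PySem.Str.len fruits_eaten
  let st := fruits_eaten.toList.foldl
    (fun (st : Int × List (String × Int)) c =>
      let count := st.1 + 1
      (count, st.2.map (fun kv =>
        if kv.1 == String.mk [c] then (kv.1, kv.2 - 1)
        else if count ≠ L then (kv.1, kv.2 + 1) else kv)))
    (0, d0)
  -- max(fruit.values()); Pre_ excludes the empty dict, where Python raises ValueError
  (PySem.List.max? (st.2.map (·.2)) (fun y => y)).getD 0

-- ===== PORT B =====
def nfruits_alt (fruit : List (String × Int)) (fruits_eaten : String) : Int :=
  let chars := fruits_eaten.toList.map (fun c => String.mk [c])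
  let counts := PySem.Dict.counter chars   -- Source B's counting loop is exactly Counter
  let L : Int := PySem.Str.len fruits_eaten
  let last := chars.getLast?
  (PySem.List.max? ((PySem.Dict.ofList fruit).items.map (fun kv =>
      kv.2 + L - 2 * counts.getD kv.1 0 -
        (if L ≠ 0 ∧ last ≠ some kv.1 then 1 else 0))) (fun y => y)).getD 0

-- ===== PRECONDITION & SPEC =====
-- Pre_ excludes only the empty fruit dict, on which Python A raises ValueError (max of an
-- empty sequence); B raises there too.
def Pre_nfruits (fruit : List (String × Int)) (fruits_eaten : String) : Prop := fruit ≠ []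
instance (fruit : List (String × Int)) (fruits_eaten : String) : Decidable (Pre_nfruits fruit fruits_eaten) := by unfold Pre_nfruits; infer_instance
def pvWitness_nfruits : (List (String × Int)) × String := ([("a", 1)], "ab")

def Spec_nfruits (fruit : List (String × Int)) (fruits_eaten : String) (out : Int) : Prop := out = nfruits_alt fruit fruits_eaten
instance (fruit : List (String × Int)) (fruits_eaten : String) (out : Int) : Decidable (Spec_nfruits fruit fruits_eaten out) := by unfold Spec_nfruits; infer_instance

-- ===== CLAIM (what is proved, stated in full; the proofs are below) =====
def Claim_equal_nfruits : Prop := ∀ (fruit : List (String × Int)) (fruits_eaten : String), Dom_nfruits fruit fruits_eaten → Pre_nfruits fruit fruits_eaten → Spec_nfruits fruit fruits_eaten (nfruits fruit fruits_eaten)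

-- ===== LEMMAS AND PROOFS =====

-- Net change of the value of key k over the character list t (positions running to the end
-- of the string): length − 2·(matches) − (1 if the last character does not match k).
def netN (t : List Char) (k : String) : Int :=
  (t.length : Int) - 2 * ((t.map (fun c => String.mk [c])).count k : Int)
    - (match t.getLast? with
       | some c => if k == String.mk [c] then 0 else 1
       | none => 0)

theorem netN_cons (c : Char) (cs : List Char) (k : String) :
    netN (c :: cs) k =
      (if k == String.mk [c] then netN cs k - 1
       else if cs ≠ [] then netN cs k + 1 else netN cs k) := by
  cases cs with
  | nil =>
      by_cases h : k = String.mk [c]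
      · simp [netN, h]
      · have h' : String.mk [c] ≠ k := fun e => h e.symm
        simp [netN, h, h']
  | cons c' cs' =>
      by_cases h : k = String.mk [c]
      · simp [netN, h, List.count_cons]; push_cast; ring
      · have h' : String.mk [c] ≠ k := fun e => h e.symm
        simp [netN, h, h', List.count_cons]; push_cast; ring

theorem loop_closed (L : Int) (t : List Char) (a : Int) (l : List (String × Int))
    (hL : a + (t.length : Int) = L) :
    t.foldl
      (fun (st : Int × List (String × Int)) c =>
        let count := st.1 + 1
        (count, st.2.map (fun kv =>
          if kv.1 == String.mk [c] then (kv.1, kv.2 - 1)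
          else if count ≠ L then (kv.1, kv.2 + 1) else kv)))
      (a, l)
    = (a + (t.length : Int), l.map (fun kv => (kv.1, kv.2 + netN t kv.1))) := by
  induction t generalizing a l with
  | nil => simp [netN]
  | cons c cs ih =>
      simp only [List.foldl_cons]
      rw [ih (a + 1) _ (by simp at hL; push_cast at hL ⊢; omega)]
      simp only [List.map_map, Prod.mk.injEq]
      constructor
      · simp only [List.length_cons]; push_cast; ring
      · apply List.map_congr_left
        intro kv _
        have hlast : (a + 1 ≠ L) ↔ cs ≠ [] := by
          constructor
          · intro h hcs; subst hcs; simp at hL; omega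
          · intro h heq
            have : (cs.length : Int) = 0 := by simp at hL; push_cast at hL; omega
            simp at this; exact h this
        rw [netN_cons]
        by_cases h1 : kv.1 = String.mk [c]
        · simp [h1]; ring
        · by_cases h2 : cs = []
          · have : ¬ (a + 1 ≠ L) := by simp only [hlast]; simp [h2]
            simp [h1, h2, this]
          · have : a + 1 ≠ L := hlast.mpr h2
            simp [h1, h2, this]; ring

-- B's per-key formula is netN of the character list.
theorem alt_term_eq (t : List Char) (k : String) :
    (t.length : Int) - 2 * (PySem.Dict.counter (t.map (fun c => String.mk [c]))).getD k 0 -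
        (if (t.length : Int) ≠ 0 ∧ (t.map (fun c => String.mk [c])).getLast? ≠ some k then 1 else 0)
      = netN t k := by
  rw [PySem.Dict.getD_counter]
  have hlast : (t.map (fun c => String.mk [c])).getLast? = t.getLast?.map (fun c => String.mk [c]) := by
    simp [List.getLast?_map]
  rw [hlast]
  unfold netN
  cases h : t.getLast? with
  | none =>
      have : t = [] := List.getLast?_eq_none_iff.mp h
      subst this; simp
  | some c =>
      have ht : t ≠ [] := by intro h0; subst h0; simp at h
      have hl : (t.length : Int) ≠ 0 := by simp [ht]
      by_cases hk : k = String.mk [c]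
      · simp [hk]
      · have hne : some (String.mk [c]) ≠ some k := by
          intro heq; exact hk (Option.some.inj heq).symm
        simp [hk, hne, ht]

-- ===== VERDICT (by name: the statement is the Claim_ definition above) =====
theorem nfruits_spec : Claim_equal_nfruits := by
  intro fruit s _ _
  unfold Spec_nfruits nfruits nfruits_alt
  dsimp only
  rw [loop_closed (PySem.Str.len s) s.toList 0 _ (by simp [PySem.Str.len_eq])]
  simp only [List.map_map]
  refine congrArg (fun l => (PySem.List.max? l (fun y => y)).getD 0) ?_
  apply List.map_congr_left
  intro kv _
  simp only [Function.comp]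
  rw [show PySem.Str.len s = (s.toList.length : Int) from by simp [PySem.Str.len_eq]]
  rw [← alt_term_eq s.toList kv.1]
  ring
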